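-- pv_equiv track=rewrite | github.com/damasters/Data-Mining | Homework 3/task1.py | generate_buckets
-- ===== SOURCE A (Python) =====
-- def generate_buckets(signature_matrix, b, r):
--     buckets = {}
--     large_buckets = {}
--     for business_id, signatures in signature_matrix.items():
--         for i in range(b):
--             band = tuple(signatures[i*r:(i+1)*r])
--             if band not in buckets:
--                 buckets[band] = []
--             buckets[band].append(business_id)
--     for band, business_ids in buckets.items():
--         if len(business_ids) > 1:
--             large_buckets[band] = business_ids
--     return large_buckets
-- ===== SOURCE B (Python) =====
-- def generate_buckets(signature_matrix, b, r):
--     # Pass 1: count how many times each band tuple occurs overall.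
--     counts = {}
--     for signatures in signature_matrix.values():
--         for i in range(b):
--             band = tuple(signatures[i*r:(i+1)*r])
--             counts[band] = counts.get(band, 0) + 1
--     # Pass 2: emit only bands seen more than once, directly into the result.
--     result = {}
--     for business_id, signatures in signature_matrix.items():
--         for i in range(b):
--             band = tuple(signatures[i*r:(i+1)*r])
--             if counts[band] > 1:
--                 result.setdefault(band, []).append(business_id)
--     return result
-- ===== Notes on version B (the rewrite author's own statement) =====
-- stated objective: alternative
-- what changed: A collects every band's full bucket in a dict and then filters out singleton buckets in a second dict pass; B instead makes a counting pass over the bands first and a second pass that emits ids directly into the result only for bands whose total count exceeds 1, never materialising singleton buckets or a filtering pass.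
import Mathlib
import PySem

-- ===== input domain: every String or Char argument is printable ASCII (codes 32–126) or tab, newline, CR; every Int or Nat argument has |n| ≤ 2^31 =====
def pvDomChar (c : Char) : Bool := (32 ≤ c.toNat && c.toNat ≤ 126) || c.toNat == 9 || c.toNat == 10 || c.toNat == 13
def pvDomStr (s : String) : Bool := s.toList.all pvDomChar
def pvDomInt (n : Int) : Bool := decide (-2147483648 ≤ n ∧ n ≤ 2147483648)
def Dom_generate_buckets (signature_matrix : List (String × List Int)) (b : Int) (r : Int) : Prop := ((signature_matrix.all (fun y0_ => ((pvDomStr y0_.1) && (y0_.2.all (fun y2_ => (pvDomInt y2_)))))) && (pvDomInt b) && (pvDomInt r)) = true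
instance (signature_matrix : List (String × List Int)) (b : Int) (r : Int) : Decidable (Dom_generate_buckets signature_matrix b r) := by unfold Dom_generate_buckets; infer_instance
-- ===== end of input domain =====

-- B replaces A's collect-all-buckets-then-filter with a count-then-emit two-pass scheme:
-- pass 1 counts each band, pass 2 appends ids only for repeated bands; alternative
-- decomposition, same asymptotic cost.

-- ===== PORT A =====
-- A appends each business id to its band's bucket (creating an empty bucket first
-- when the band is new), then copies the buckets with more than one id.
def generate_buckets (signature_matrix : List (String × List Int)) (b : Int) (r : Int) : List (List Int × List String) :=
  let m := PySem.Dict.ofList signature_matrix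
  let buckets : PySem.Dict (List Int) (List String) :=
    m.items.foldl (fun bk pr =>
      (PySem.List.pyRange 0 b 1).foldl (fun bk i =>
        let band := PySem.List.slice pr.2 (some (i * r)) (some ((i + 1) * r))
        let bk := if bk.contains band then bk else bk.insert band []
        bk.modify band [] (fun l => l ++ [pr.1])) bk) PySem.Dict.empty
  let large_buckets : PySem.Dict (List Int) (List String) :=
    buckets.items.foldl (fun lb pr =>
      if pr.2.length > 1 then lb.insert pr.1 pr.2 else lb) PySem.Dict.empty
  large_buckets.items

-- ===== PORT B =====
-- B: pass 1 counts each band's occurrences; pass 2 emits, in stream order, only the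
-- ids of bands whose total count exceeds 1.  result.setdefault(band, []).append(id)
-- is ported as setdefault followed by modify-with-default-[].
def generate_buckets_alt (signature_matrix : List (String × List Int)) (b : Int) (r : Int) : List (List Int × List String) :=
  let m := PySem.Dict.ofList signature_matrix
  let counts : PySem.Dict (List Int) Int :=
    m.values.foldl (fun c signatures =>
      (PySem.List.pyRange 0 b 1).foldl (fun c i =>
        let band := PySem.List.slice signatures (some (i * r)) (some ((i + 1) * r))
        c.insert band (c.getD band 0 + 1)) c) PySem.Dict.empty
  let result : PySem.Dict (List Int) (List String) :=
    m.items.foldl (fun res pr =>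
      (PySem.List.pyRange 0 b 1).foldl (fun res i =>
        let band := PySem.List.slice pr.2 (some (i * r)) (some ((i + 1) * r))
        if counts.getD band 0 > 1 then (res.setdefault band []).modify band [] (fun l => l ++ [pr.1])
        else res) res) PySem.Dict.empty
  result.items

-- ===== PRECONDITION & SPEC =====
def Spec_generate_buckets (signature_matrix : List (String × List Int)) (b : Int) (r : Int) (out : List (List Int × List String)) : Prop := out = generate_buckets_alt signature_matrix b r
instance (signature_matrix : List (String × List Int)) (b : Int) (r : Int) (out : List (List Int × List String)) : Decidable (Spec_generate_buckets signature_matrix b r out) := by unfold Spec_generate_buckets; infer_instance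

-- ===== CLAIM (what is proved, stated in full; the proofs are below) =====
def Claim_equal_generate_buckets : Prop := ∀ (signature_matrix : List (String × List Int)) (b : Int) (r : Int), Dom_generate_buckets signature_matrix b r → Spec_generate_buckets signature_matrix b r (generate_buckets signature_matrix b r)

-- ===== LEMMAS AND PROOFS =====

-- the bands one business contributes, and the flat (band, id) stream both programs traverse
def pvBands (b r : Int) (sigs : List Int) : List (List Int) :=
  (PySem.List.pyRange 0 b 1).map (fun i => PySem.List.slice sigs (some (i * r)) (some ((i + 1) * r)))

def pvP (signature_matrix : List (String × List Int)) (b r : Int) : List (List Int × String) :=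
  (PySem.Dict.ofList signature_matrix).items.flatMap
    (fun pr => (pvBands b r pr.2).map (fun band => (band, pr.1)))

-- the ids a given band collects, in stream order
def pvGroup (P : List (List Int × String)) (band : List Int) : List String :=
  (P.filter (fun q => q.1 == band)).map (·.2)

-- the grouping dict both ports build (A on the whole stream, B on the filtered stream)
def pvBDict (P : List (List Int × String)) : PySem.Dict (List Int) (List String) :=
  P.foldl (fun d q => d.modify q.1 [] (fun l => l ++ [q.2])) PySem.Dict.empty

theorem pv_foldl_flatMap {α β γ : Type} (l : List α) (g : α → List β) (f : γ → β → γ) (init : γ) :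
    (l.flatMap g).foldl f init = l.foldl (fun acc x => (g x).foldl f acc) init := by
  induction l generalizing init with
  | nil => rfl
  | cons x xs ih => simp [List.flatMap_cons, List.foldl_append, ih]

-- A's "if new: bucket = []; bucket.append(id)" is one modify-with-default step
theorem pv_stepA_eq (d : PySem.Dict (List Int) (List String)) (band : List Int) (bid : String) :
    ((if d.contains band then d else d.insert band []).modify band [] (fun l => l ++ [bid]))
      = d.modify band [] (fun l => l ++ [bid]) := by
  by_cases hc : d.contains band = true
  · simp [hc]
  · have hf : d.contains band = false := by simpa using hc
    simp [hc, PySem.Dict.modify, PySem.Dict.getD_insert_self, PySem.Dict.insert_insert_self,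
      PySem.Dict.getD_of_not_contains d _ hf]

-- B's "setdefault(band, []).append(id)" is the same modify-with-default step
theorem pv_stepB_eq (d : PySem.Dict (List Int) (List String)) (band : List Int) (bid : String) :
    ((d.setdefault band []).modify band [] (fun l => l ++ [bid]))
      = d.modify band [] (fun l => l ++ [bid]) := by
  by_cases hc : d.contains band = true
  · simp [PySem.Dict.setdefault_of_contains d _ hc]
  · have hf : d.contains band = false := by simpa using hc
    simp [PySem.Dict.setdefault_of_not_contains d _ hf, PySem.Dict.modify,
      PySem.Dict.getD_insert_self, PySem.Dict.insert_insert_self,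
      PySem.Dict.getD_of_not_contains d _ hf]

-- the grouping dict lists each band once (first occurrence) with its ids
theorem pv_items_pvBDict (P : List (List Int × String)) :
    (pvBDict P).items
      = (PySem.Set.ofList (P.map (·.1))).map (fun band => (band, pvGroup P band)) := by
  have hnd : (pvBDict P).keys.Nodup := by
    unfold pvBDict
    exact PySem.Dict.nodup_keys_foldl_modify_key P (·.1) [] (fun d q => fun l => l ++ [q.2]) _
      PySem.Dict.nodup_keys_empty
  rw [PySem.Dict.items_eq_map_keys _ hnd []]
  unfold pvBDict
  rw [PySem.Dict.keys_foldl_modify_key]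
  simp [PySem.Dict.keys_empty, PySem.Set.update_nil_left, PySem.Dict.getD_foldl_modify_append,
    PySem.Dict.getD_empty, pvGroup]

-- first-occurrence dedup commutes with filtering
theorem pv_ofList_filter (p : List Int → Bool) (xs : List (List Int)) :
    PySem.Set.ofList (xs.filter p) = (PySem.Set.ofList xs).filter p := by
  induction xs using List.reverseRecOn with
  | nil => rfl
  | append_singleton xs x ih =>
    rw [List.filter_append, PySem.Set.ofList_append_singleton]
    by_cases hp : p x = true
    · simp only [List.filter_singleton, hp, cond_true]
      rw [PySem.Set.ofList_append_singleton, ih, PySem.Set.add_eq_ite, PySem.Set.add_eq_ite]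
      by_cases hm : x ∈ PySem.Set.ofList xs
      · rw [if_pos hm, if_pos (by simp [List.mem_filter, hm, hp])]
      · rw [if_neg hm, if_neg (by simp [List.mem_filter, hm]), List.filter_append]
        simp [hp]
    · simp only [List.filter_singleton, hp, cond_false, List.append_nil, ih,
        PySem.Set.add_eq_ite]
      by_cases hm : x ∈ PySem.Set.ofList xs
      · rw [if_pos hm]
      · rw [if_neg hm, List.filter_append]
        simp [hp]

-- a band's bucket size is its number of occurrences in the stream
theorem pv_group_length (P : List (List Int × String)) (band : List Int) :
    (pvGroup P band).length = (P.map (·.1)).count band := by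
  simp only [pvGroup, List.length_map, List.count_eq_countP, List.countP_map,
    ← List.countP_eq_length_filter]
  rfl

theorem pv_buckets_eq (sm : List (String × List Int)) (b r : Int) :
    ((PySem.Dict.ofList sm).items.foldl (fun bk pr =>
      (PySem.List.pyRange 0 b 1).foldl (fun bk i =>
        let band := PySem.List.slice pr.2 (some (i * r)) (some ((i + 1) * r))
        let bk := if bk.contains band then bk else bk.insert band []
        bk.modify band [] (fun l => l ++ [pr.1])) bk) PySem.Dict.empty)
      = pvBDict (pvP sm b r) := by
  rw [pvBDict, pvP, pv_foldl_flatMap]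
  refine PySem.List.foldl_congr_mem _ _ _ _ (fun acc pr _ => ?_)
  rw [List.foldl_map, pvBands, List.foldl_map]
  refine PySem.List.foldl_congr_mem _ _ _ _ (fun acc2 i _ => ?_)
  exact pv_stepA_eq acc2 _ pr.1

-- A = every band of the stream, first-occurrence order, with its ids; buckets of size > 1 kept
theorem pv_A_char (sm : List (String × List Int)) (b r : Int) :
    generate_buckets sm b r
      = ((PySem.Set.ofList ((pvP sm b r).map (·.1))).map
          (fun band => (band, pvGroup (pvP sm b r) band))).filter
            (fun pr => decide (pr.2.length > 1)) := by
  unfold generate_buckets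
  dsimp only
  rw [pv_buckets_eq, pv_items_pvBDict]
  set its := (PySem.Set.ofList ((pvP sm b r).map (·.1))).map
      (fun band => (band, pvGroup (pvP sm b r) band)) with hits
  rw [PySem.List.foldl_ite_eq_foldl_filter (p := fun pr : List Int × List String => pr.2.length > 1)
      (f := fun (lb : PySem.Dict (List Int) (List String)) pr => lb.insert pr.1 pr.2) (l := its) (init := PySem.Dict.empty)]
  rw [PySem.Dict.items_foldl_insert_fresh _ Prod.fst Prod.snd _
      (fun a _ => PySem.Dict.contains_empty _) ?nodup]
  · simp [PySem.Dict.empty]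
  case nodup =>
    have h1 : (its.map Prod.fst).Nodup := by
      rw [hits, List.map_map]
      have hid : (Prod.fst ∘ fun band => (band, pvGroup (pvP sm b r) band)) = id := rfl
      rw [hid, List.map_id]
      exact PySem.Set.nodup_ofList _
    exact ((List.filter_sublist (l := its)).map Prod.fst).nodup h1

-- B's first pass is Counter(all bands of the stream)
theorem pv_counts_eq (sm : List (String × List Int)) (b r : Int) :
    ((PySem.Dict.ofList sm).values.foldl (fun c signatures =>
      (PySem.List.pyRange 0 b 1).foldl (fun c i =>
        let band := PySem.List.slice signatures (some (i * r)) (some ((i + 1) * r))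
        c.insert band (c.getD band 0 + 1)) c) PySem.Dict.empty)
      = PySem.Dict.counter ((pvP sm b r).map (·.1)) := by
  have hK : (pvP sm b r).map (·.1)
      = (PySem.Dict.ofList sm).items.flatMap (fun pr => pvBands b r pr.2) := by
    rw [pvP, List.map_flatMap]
    simp [List.map_map, Function.comp_def]
  rw [← PySem.Dict.foldl_insert_getD_add_one_eq_counter, hK, pv_foldl_flatMap]
  have hv : (PySem.Dict.ofList sm).values = (PySem.Dict.ofList sm).items.map (·.2) := rfl
  rw [hv, List.foldl_map]
  refine PySem.List.foldl_congr_mem _ _ _ _ (fun acc pr _ => ?_)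
  rw [pvBands, List.foldl_map]

-- B = bands with stream count > 1, first-occurrence order, with their ids
theorem pv_B_char (sm : List (String × List Int)) (b r : Int) :
    generate_buckets_alt sm b r
      = (PySem.Set.ofList (((pvP sm b r).filter
            (fun q => decide (1 < ((pvP sm b r).map (·.1)).count q.1))).map (·.1))).map
          (fun band => (band, pvGroup ((pvP sm b r).filter
            (fun q => decide (1 < ((pvP sm b r).map (·.1)).count q.1))) band)) := by
  unfold generate_buckets_alt
  dsimp only
  rw [pv_counts_eq]
  set C := PySem.Dict.counter ((pvP sm b r).map (·.1)) with hC
  rw [show ((PySem.Dict.ofList sm).items.foldl (fun res pr =>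
      (PySem.List.pyRange 0 b 1).foldl (fun res i =>
        let band := PySem.List.slice pr.2 (some (i * r)) (some ((i + 1) * r))
        if C.getD band 0 > 1 then
          (res.setdefault band []).modify band [] (fun l => l ++ [pr.1])
        else res) res) PySem.Dict.empty)
      = (pvP sm b r).foldl (fun res q =>
          if C.getD q.1 0 > 1 then
            res.modify q.1 [] (fun l => l ++ [q.2]) else res) PySem.Dict.empty from ?_]
  · rw [PySem.List.foldl_ite_eq_foldl_filter
      (p := fun q : List Int × String => C.getD q.1 0 > 1)
      (f := fun (res : PySem.Dict (List Int) (List String)) q => res.modify q.1 [] (fun l => l ++ [q.2]))]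
    have hfc : (pvP sm b r).filter (fun q => decide (C.getD q.1 0 > 1))
        = (pvP sm b r).filter (fun q => decide (1 < ((pvP sm b r).map (·.1)).count q.1)) := by
      refine List.filter_congr (fun q _ => ?_)
      rw [hC, PySem.Dict.getD_counter]
      simp
    rw [hfc, ← pvBDict, pv_items_pvBDict]
  · rw [pvP, pv_foldl_flatMap]
    refine PySem.List.foldl_congr_mem _ _ _ _ (fun acc pr _ => ?_)
    rw [List.foldl_map, pvBands, List.foldl_map]
    refine PySem.List.foldl_congr_mem _ _ _ _ (fun acc2 i _ => ?_)
    dsimp only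
    by_cases h : C.getD (PySem.List.slice pr.2 (some (i * r)) (some ((i + 1) * r))) 0 > 1
    · rw [if_pos h, if_pos h, pv_stepB_eq]
    · rw [if_neg h, if_neg h]

-- filtering buckets by size equals pre-filtering the stream by band count
theorem pv_main (P : List (List Int × String)) :
    ((PySem.Set.ofList (P.map (·.1))).map
          (fun band => (band, pvGroup P band))).filter (fun pr => decide (pr.2.length > 1))
    = (PySem.Set.ofList ((P.filter
            (fun q => decide (1 < (P.map (·.1)).count q.1))).map (·.1))).map
          (fun band => (band, pvGroup (P.filter
            (fun q => decide (1 < (P.map (·.1)).count q.1))) band)) := by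
  have h1 : (P.filter (fun q => decide (1 < (P.map (·.1)).count q.1))).map (·.1)
      = (P.map (·.1)).filter (fun band => decide (1 < (P.map (·.1)).count band)) := by
    rw [show (fun q : List Int × String => decide (1 < (P.map (·.1)).count q.1))
        = ((fun band => decide (1 < (P.map (·.1)).count band)) ∘ (fun x : List Int × String => x.1))
        from rfl, ← List.filter_map]
  rw [h1, pv_ofList_filter, List.filter_map]
  have h2 : ((fun pr : List Int × List String => decide (pr.2.length > 1)) ∘
      (fun band => (band, pvGroup P band)))
      = fun band => decide (1 < (P.map (·.1)).count band) := by
    funext band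
    simp only [Function.comp_apply, pv_group_length]
  rw [h2]
  refine List.map_congr_left (fun band hband => ?_)
  have hcnt : 1 < (P.map (·.1)).count band :=
    of_decide_eq_true (List.mem_filter.mp hband).2
  refine congrArg _ ?_
  unfold pvGroup
  rw [List.filter_filter]
  refine congrArg (List.map _) (List.filter_congr (fun q _ => ?_)).symm
  by_cases hqb : (q.1 == band) = true
  · have hq1 : q.1 = band := by simpa using hqb
    simp [hq1, hcnt]
  · simp [hqb]

-- ===== VERDICT (by name: the statement is the Claim_ definition above) =====
theorem generate_buckets_spec : Claim_equal_generate_buckets := by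
  intro sm b r _
  show generate_buckets sm b r = generate_buckets_alt sm b r
  rw [pv_A_char, pv_B_char]
  exact pv_main (pvP sm b r)
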